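-- pv_equiv track=rewrite | github.com/HollandsP/Evergreen | src/services/ai_scene_analyzer.py | _infer_setting
-- ===== SOURCE A (Python) =====
-- from typing import Dict, List, Any, Optional, Tuple, Union
--
-- def _infer_setting(objects: List[str]) -> List[str]:
--     """Infer setting from detected objects."""
--     settings = []
--
--     indoor_objects = ['table', 'chair', 'book', 'computer', 'phone']
--     outdoor_objects = ['tree', 'car', 'building', 'sky', 'road']
--
--     if any(obj in objects for obj in indoor_objects):
--         settings.append("indoor")
--     if any(obj in objects for obj in outdoor_objects):
--         settings.append("outdoor")
--
--     if not settings: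
--         settings.append("unknown")
--
--     return settings
-- ===== SOURCE B (Python) =====
-- def _infer_setting(objects):
--     """Infer setting from detected objects."""
--     indoor = {'table', 'chair', 'book', 'computer', 'phone'}
--     outdoor = {'tree', 'car', 'building', 'sky', 'road'}
--     found_indoor = False
--     found_outdoor = False
--     for obj in objects:
--         if obj in indoor:
--             found_indoor = True
--         if obj in outdoor:
--             found_outdoor = True
--     settings = []
--     if found_indoor:
--         settings.append("indoor")
--     if found_outdoor:
--         settings.append("outdoor")
--     return settings if settings else ["unknown"]
-- ===== Notes on version B (the rewrite author's own statement) =====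
-- stated objective: alternative
-- what changed: B makes a single pass over the input, setting indoor/outdoor flags per element against two fixed sets, instead of A's two scans over the fixed candidate lists each testing membership in the input list.
import Mathlib
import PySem

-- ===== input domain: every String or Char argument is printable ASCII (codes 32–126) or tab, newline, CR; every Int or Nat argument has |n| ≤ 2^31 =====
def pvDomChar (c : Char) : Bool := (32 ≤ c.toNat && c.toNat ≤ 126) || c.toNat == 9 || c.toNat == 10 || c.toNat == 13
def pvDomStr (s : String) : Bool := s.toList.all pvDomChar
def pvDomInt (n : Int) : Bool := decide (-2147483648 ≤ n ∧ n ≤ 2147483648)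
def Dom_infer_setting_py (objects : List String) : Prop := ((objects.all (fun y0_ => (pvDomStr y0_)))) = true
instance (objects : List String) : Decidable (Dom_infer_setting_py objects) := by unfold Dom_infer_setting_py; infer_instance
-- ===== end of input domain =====

-- B replaces A's two scans over fixed candidate lists by a single pass over the input with two flags (alternative decomposition).


-- ===== PORT A =====
-- A: fixed candidate lists; any(obj in objects for obj in indoor_objects) etc.
def infer_setting_py (objects : List String) : List String :=
  let settings : List String := []
  let indoor_objects : List String := ["table", "chair", "book", "computer", "phone"]
  let outdoor_objects : List String := ["tree", "car", "building", "sky", "road"]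
  let settings := if indoor_objects.any (fun obj => objects.contains obj) then settings ++ ["indoor"] else settings
  let settings := if outdoor_objects.any (fun obj => objects.contains obj) then settings ++ ["outdoor"] else settings
  let settings := if settings = [] then settings ++ ["unknown"] else settings
  settings

-- ===== PORT B =====
-- B: one fold over the input, maintaining (found_indoor, found_outdoor) flags.
def pvIndoorSet : PySem.Set String := PySem.Set.ofList ["table", "chair", "book", "computer", "phone"]
def pvOutdoorSet : PySem.Set String := PySem.Set.ofList ["tree", "car", "building", "sky", "road"]

def infer_setting_py_alt (objects : List String) : List String :=
  let flags := objects.foldl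
    (fun (p : Bool × Bool) obj =>
      (if pvIndoorSet.contains obj then true else p.1,
       if pvOutdoorSet.contains obj then true else p.2))
    (false, false)
  let settings : List String := []
  let settings := if flags.1 then settings ++ ["indoor"] else settings
  let settings := if flags.2 then settings ++ ["outdoor"] else settings
  if settings = [] then ["unknown"] else settings

-- ===== PRECONDITION & SPEC =====
def Spec_infer_setting_py (objects : List String) (out : List String) : Prop := out = infer_setting_py_alt objects
instance (objects : List String) (out : List String) : Decidable (Spec_infer_setting_py objects out) := by unfold Spec_infer_setting_py; infer_instance

-- ===== CLAIM (what is proved, stated in full; the proofs are below) =====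
def Claim_equal_infer_setting_py : Prop := ∀ (objects : List String), Dom_infer_setting_py objects → Spec_infer_setting_py objects (infer_setting_py objects)

-- ===== LEMMAS AND PROOFS =====

-- The fold accumulates 'did any element of objects lie in the set' into each flag.
theorem pv_fold_flags (objects : List String) (fi fo : Bool) :
    objects.foldl
      (fun (p : Bool × Bool) obj =>
        (if pvIndoorSet.contains obj then true else p.1,
         if pvOutdoorSet.contains obj then true else p.2))
      (fi, fo)
    = (fi || objects.any (fun o => pvIndoorSet.contains o),
       fo || objects.any (fun o => pvOutdoorSet.contains o)) := by
  induction objects generalizing fi fo with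
  | nil => simp
  | cons h t ih =>
    simp only [List.foldl_cons, List.any_cons, ih]
    simp only [Prod.mk.injEq]
    constructor <;> split <;> simp_all

-- A's scan over a fixed candidate list equals B's scan over the input (membership is symmetric).
theorem pv_any_comm (l m : List String) :
    l.any (fun x => m.contains x) = m.any (fun x => l.contains x) := by
  simp only [List.any_eq, decide_eq_decide, List.contains_eq_mem]
  simp only [decide_eq_true_eq]
  tauto

-- ===== VERDICT (by name: the statement is the Claim_ definition above) =====
theorem infer_setting_py_spec : Claim_equal_infer_setting_py := by
  intro objects _
  show infer_setting_py objects = infer_setting_py_alt objects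
  unfold infer_setting_py infer_setting_py_alt
  rw [pv_fold_flags]
  simp only [Bool.false_or]
  rw [pv_any_comm ["table", "chair", "book", "computer", "phone"] objects,
      pv_any_comm ["tree", "car", "building", "sky", "road"] objects]
  have hi : ∀ o : String, pvIndoorSet.contains o
      = (["table", "chair", "book", "computer", "phone"] : List String).contains o := by
    intro o; simp [pvIndoorSet, PySem.Set.contains, PySem.Set.mem_ofList, List.contains_eq_mem]
  have ho : ∀ o : String, pvOutdoorSet.contains o
      = (["tree", "car", "building", "sky", "road"] : List String).contains o := by
    intro o; simp [pvOutdoorSet, PySem.Set.contains, PySem.Set.mem_ofList, List.contains_eq_mem]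
  simp only [hi, ho]
  split_ifs <;> simp_all
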